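-- pv_equiv track=rewrite | github.com/KristiyanYanakiev/Softuni_Programming_Advanced | functions_advanced_lab/functions_advanced_exercises/01_negative_vs_positive.py | find_positive_and_negative_sums
-- ===== SOURCE A (Python) =====
-- def find_positive_and_negative_sums(nums):
--     positive_sum = sum(num for num in nums if num > 0)
--     negative_sum = sum(num for num in nums if num < 0)
--
--     result = ""
--     if abs(negative_sum) > positive_sum:
--         result = f"{negative_sum}\n{positive_sum}\nThe negatives are stronger than the positives"
--     else:
--         result = f"{negative_sum}\n{positive_sum}\nThe positives are stronger than the negatives"
--
--     return result
-- ===== SOURCE B (Python) =====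
-- def find_positive_and_negative_sums(nums):
--     total = sum(nums)
--     magnitude = sum(abs(num) for num in nums)
--     positive_sum = (magnitude + total) // 2
--     negative_sum = (total - magnitude) // 2
--     if -negative_sum > positive_sum:
--         stronger, weaker = "negatives", "positives"
--     else:
--         stronger, weaker = "positives", "negatives"
--     return f"{negative_sum}\n{positive_sum}\nThe {stronger} are stronger than the {weaker}"
-- ===== Notes on version B (the rewrite author's own statement) =====
-- stated objective: alternative
-- what changed: B never branches on signs: it computes total=sum(nums) and magnitude=sum(|num|) and recovers positive_sum=(magnitude+total)//2 and negative_sum=(total-magnitude)//2 by the arithmetic identity, then picks the message words from the comparison.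
import Mathlib
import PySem

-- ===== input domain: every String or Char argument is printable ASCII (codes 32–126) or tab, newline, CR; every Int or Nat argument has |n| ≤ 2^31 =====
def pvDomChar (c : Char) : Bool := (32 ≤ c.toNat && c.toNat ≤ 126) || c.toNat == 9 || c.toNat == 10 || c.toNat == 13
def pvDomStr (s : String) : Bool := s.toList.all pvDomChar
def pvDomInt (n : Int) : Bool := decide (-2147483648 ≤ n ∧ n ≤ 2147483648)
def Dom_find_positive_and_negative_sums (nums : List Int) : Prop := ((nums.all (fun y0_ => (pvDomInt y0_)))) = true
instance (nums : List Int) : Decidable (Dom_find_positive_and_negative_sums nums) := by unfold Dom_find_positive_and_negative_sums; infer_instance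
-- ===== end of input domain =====

-- B avoids sign-branching entirely: it recovers both sums arithmetically from sum and sum-of-abs (objective: alternative).

-- ===== PORT A =====
def find_positive_and_negative_sums (nums : List Int) : String :=
  let positive_sum : Int := ((nums.filter (fun num => num > 0)).foldl (· + ·) 0)
  let negative_sum : Int := ((nums.filter (fun num => num < 0)).foldl (· + ·) 0)
  if |negative_sum| > positive_sum then
    PySem.Int.toStr negative_sum ++ "\n" ++ PySem.Int.toStr positive_sum ++
      "\nThe negatives are stronger than the positives"
  else
    PySem.Int.toStr negative_sum ++ "\n" ++ PySem.Int.toStr positive_sum ++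
      "\nThe positives are stronger than the negatives"

-- ===== PORT B =====
def find_positive_and_negative_sums_alt (nums : List Int) : String :=
  let total : Int := nums.foldl (· + ·) 0
  let magnitude : Int := (nums.map (fun num => |num|)).foldl (· + ·) 0
  let positive_sum : Int := PySem.Int.floordiv (magnitude + total) 2
  let negative_sum : Int := PySem.Int.floordiv (total - magnitude) 2
  let words : String × String :=
    if -negative_sum > positive_sum then ("negatives", "positives")
    else ("positives", "negatives")
  PySem.Int.toStr negative_sum ++ "\n" ++ PySem.Int.toStr positive_sum ++
    "\nThe " ++ words.1 ++ " are stronger than the " ++ words.2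

-- ===== PRECONDITION & SPEC =====
def Spec_find_positive_and_negative_sums (nums : List Int) (out : String) : Prop := out = find_positive_and_negative_sums_alt nums
instance (nums : List Int) (out : String) : Decidable (Spec_find_positive_and_negative_sums nums out) := by unfold Spec_find_positive_and_negative_sums; infer_instance

-- ===== CLAIM (what is proved, stated in full; the proofs are below) =====
def Claim_equal_find_positive_and_negative_sums : Prop := ∀ (nums : List Int), Dom_find_positive_and_negative_sums nums → Spec_find_positive_and_negative_sums nums (find_positive_and_negative_sums nums)

-- ===== LEMMAS AND PROOFS =====

theorem pv_foldl_add_init (l : List Int) (c : Int) :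
    l.foldl (· + ·) c = c + l.foldl (· + ·) 0 := by
  induction l generalizing c with
  | nil => simp
  | cons x xs ih =>
    simp only [List.foldl_cons]
    rw [ih (c + x), ih (0 + x)]
    ring

-- total = pos-filter sum + neg-filter sum
theorem pv_total_eq (l : List Int) :
    l.foldl (· + ·) 0
      = (l.filter (fun num => num > 0)).foldl (· + ·) 0
        + (l.filter (fun num => num < 0)).foldl (· + ·) 0 := by
  induction l with
  | nil => simp
  | cons x xs ih =>
    simp only [List.foldl_cons, List.filter_cons, zero_add]
    rw [pv_foldl_add_init xs x, ih]
    by_cases hx : x > 0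
    · have hx' : ¬ x < 0 := by omega
      simp only [hx, hx', decide_true, decide_false, Bool.false_eq_true, if_true, if_false,
        List.foldl_cons, zero_add, pv_foldl_add_init _ x]
      ring
    · by_cases hx2 : x < 0
      · simp only [hx, hx2, decide_true, decide_false, Bool.false_eq_true, if_true, if_false,
          List.foldl_cons, zero_add, pv_foldl_add_init _ x]
        ring
      · have hx0 : x = 0 := by omega
        subst hx0
        norm_num

-- magnitude = pos-filter sum − neg-filter sum
theorem pv_magnitude_eq (l : List Int) :
    (l.map (fun num => |num|)).foldl (· + ·) 0
      = (l.filter (fun num => num > 0)).foldl (· + ·) 0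
        - (l.filter (fun num => num < 0)).foldl (· + ·) 0 := by
  induction l with
  | nil => simp
  | cons x xs ih =>
    simp only [List.map_cons, List.foldl_cons, List.filter_cons, zero_add]
    rw [pv_foldl_add_init (xs.map (fun num => |num|)) |x|, ih]
    by_cases hx : x > 0
    · have hx' : ¬ x < 0 := by omega
      have ha : |x| = x := abs_of_pos hx
      simp only [hx, hx', decide_true, decide_false, Bool.false_eq_true, if_true, if_false,
        List.foldl_cons, zero_add, pv_foldl_add_init _ x, ha]
      ring
    · by_cases hx2 : x < 0
      · have ha : |x| = -x := abs_of_neg hx2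
        simp only [hx, hx2, decide_true, decide_false, Bool.false_eq_true, if_true, if_false,
          List.foldl_cons, zero_add, pv_foldl_add_init _ x, ha]
        ring
      · have hx0 : x = 0 := by omega
        subst hx0
        norm_num

theorem pv_fdiv_two_double (p : Int) : PySem.Int.floordiv (2 * p) 2 = p := by
  rw [PySem.Int.floordiv_eq_ediv_of_pos (by norm_num)]
  omega

theorem find_positive_and_negative_sums_spec : Claim_equal_find_positive_and_negative_sums := by
  intro nums _
  unfold Spec_find_positive_and_negative_sums find_positive_and_negative_sums find_positive_and_negative_sums_alt
  simp only
  set P : Int := (nums.filter (fun num => num > 0)).foldl (· + ·) 0 with hP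
  set N : Int := (nums.filter (fun num => num < 0)).foldl (· + ·) 0 with hN
  have htot := pv_total_eq nums
  have hmag := pv_magnitude_eq nums
  rw [htot, hmag]
  have h1 : (P - N) + (P + N) = 2 * P := by ring
  have h2 : (P + N) - (P - N) = 2 * N := by ring
  rw [h1, h2, pv_fdiv_two_double, pv_fdiv_two_double]
  have hPnn : 0 ≤ P := by
    rw [hP]
    have : ∀ (l : List Int), (∀ x ∈ l, 0 < x) → 0 ≤ l.foldl (· + ·) 0 := by
      intro l hl
      induction l with
      | nil => simp
      | cons x xs ih =>
        simp only [List.foldl_cons, zero_add]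
        rw [pv_foldl_add_init xs x]
        have := hl x (by simp)
        have := ih (fun y hy => hl y (by simp [hy]))
        omega
    exact this _ (fun x hx => by simpa using (List.of_mem_filter hx))
  have hNnp : N ≤ 0 := by
    rw [hN]
    have : ∀ (l : List Int), (∀ x ∈ l, x < 0) → l.foldl (· + ·) 0 ≤ 0 := by
      intro l hl
      induction l with
      | nil => simp
      | cons x xs ih =>
        simp only [List.foldl_cons, zero_add]
        rw [pv_foldl_add_init xs x]
        have := hl x (by simp)
        have := ih (fun y hy => hl y (by simp [hy]))
        omega
    exact this _ (fun x hx => by simpa using (List.of_mem_filter hx))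
  have habs : |N| = -N := abs_of_nonpos hNnp
  rw [habs]
  by_cases hc : -N > P
  · simp only [hc, if_true, String.append_assoc]
    rfl
  · simp only [hc, if_false, String.append_assoc]
    rfl
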